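-- pv_equiv track=rewrite | github.com/thomasahle/multisplit | balanced.py | naiive
-- ===== SOURCE A (Python) =====
-- def naiive(m,k):
--     if m == 0:
--         yield ()
--         return
--     for i in range(m*k):
--         for s in naiive(m-1, k):
--             if i > m*k-k:
--                 yield (m,)*(k-m*k+i) + s + (m,)*(m*k-i)
--             else:
--                 yield s[:i] + (m,)*k + s[i:]
-- ===== SOURCE B (Python) =====
-- def naiive(m, k):
--     # Bottom-up: build all sequences level by level instead of recursing.
--     if m < 0:
--         return
--     results = [()]
--     for level in range(1, m + 1):
--         if not results:
--             break  # no sequences at this level, so none at any later level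
--         mk = level * k
--         nxt = []
--         for i in range(mk):
--             for s in results:
--                 if i > mk - k:
--                     nxt.append((level,) * (k - mk + i) + s + (level,) * (mk - i))
--                 else:
--                     nxt.append(s[:i] + (level,) * k + s[i:])
--         results = nxt
--     yield from results
-- ===== Notes on version B (the rewrite author's own statement) =====
-- stated objective: alternative
-- what changed: Replaces top-down recursion (each yield re-enumerates naiive(m-1,k) from scratch) with a bottom-up iteration that builds the level-l list once from the level-(l-1) list, preserving the exact branch logic and output order.
import Mathlib
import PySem

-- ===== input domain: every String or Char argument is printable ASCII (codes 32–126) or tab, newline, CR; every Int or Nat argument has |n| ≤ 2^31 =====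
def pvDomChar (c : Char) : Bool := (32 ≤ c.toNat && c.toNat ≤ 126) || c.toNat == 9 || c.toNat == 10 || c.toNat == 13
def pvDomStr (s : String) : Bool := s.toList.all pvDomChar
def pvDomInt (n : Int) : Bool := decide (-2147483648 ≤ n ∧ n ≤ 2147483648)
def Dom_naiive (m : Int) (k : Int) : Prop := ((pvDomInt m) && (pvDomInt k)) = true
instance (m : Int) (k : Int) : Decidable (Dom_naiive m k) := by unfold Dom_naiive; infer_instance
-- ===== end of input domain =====

-- B replaces A's top-down recursion (which re-enumerates each lower level from scratch)
-- with a bottom-up level-by-level loop computing each level's list once (breaking early when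
-- a level is empty); same values, same order.


-- ===== PORT A =====
-- Literal port of A. The 'm < 0 → []' guard only makes the recursion total: for m < 0, k ≥ 0
-- Python's range(m*k) is empty (yields nothing), and m < 0 ∧ k < 0 (infinite recursion) is outside Pre_.
def naiive (m : Int) (k : Int) : List (List Int) :=
  if m = 0 then [[]]
  else if m < 0 then []
  else
    (PySem.List.pyRange 0 (m * k) 1).flatMap (fun i =>
      (naiive (m - 1) k).map (fun s =>
        if i > m * k - k then
          List.replicate (k - m * k + i).toNat m ++ s ++ List.replicate (m * k - i).toNat m
        else
          PySem.List.slice s none (some i) ++ List.replicate k.toNat m ++ PySem.List.slice s (some i) none))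
termination_by m.toNat
decreasing_by omega

-- ===== PORT B =====
-- One level of B's loop body: the nested 'for i: for s: nxt.append(…)' building the next level.
def naiiveAltStep (results : List (List Int)) (level : Int) (k : Int) : List (List Int) :=
  let mk := level * k
  (PySem.List.pyRange 0 mk 1).foldl
    (fun nxt i =>
      results.foldl
        (fun nxt s =>
          nxt ++ [if i > mk - k then
                    List.replicate (k - mk + i).toNat level ++ s ++ List.replicate (mk - i).toNat level
                  else
                    PySem.List.slice s none (some i) ++ List.replicate k.toNat level ++ PySem.List.slice s (some i) none])
        nxt)
    []

-- B's 'for level in range(1, m+1)' loop with its 'if not results: break'.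
def naiiveAltLoop (k : Int) (level : Int) (stop : Int) (results : List (List Int)) : List (List Int) :=
  if level < stop then
    if results.isEmpty then results
    else naiiveAltLoop k (level + 1) stop (naiiveAltStep results level k)
  else results
termination_by (stop - level).toNat
decreasing_by omega

def naiive_alt (m : Int) (k : Int) : List (List Int) :=
  if m < 0 then [] else naiiveAltLoop k 1 (m + 1) [[]]

-- ===== PRECONDITION & SPEC =====
-- Pre_ excludes (a) m < 0 ∧ k < 0, where m*k > 0 makes the range nonempty and m recurses away from 0
-- forever (RecursionError), and (b) m ≥ 1000 ∧ k ≥ 1, where A's recursion depth m exceeds CPython's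
-- default recursion limit and A raises RecursionError before yielding anything: A yields no value in either region.
def Pre_naiive (m : Int) (k : Int) : Prop := (0 ≤ m ∨ 0 ≤ k) ∧ (m < 1000 ∨ k ≤ 0)
instance (m : Int) (k : Int) : Decidable (Pre_naiive m k) := by unfold Pre_naiive; infer_instance
def pvWitness_naiive : Int × Int := (2, 2)

def Spec_naiive (m : Int) (k : Int) (out : List (List Int)) : Prop := out = naiive_alt m k
instance (m : Int) (k : Int) (out : List (List Int)) : Decidable (Spec_naiive m k out) := by unfold Spec_naiive; infer_instance

-- ===== CLAIM (what is proved, stated in full; the proofs are below) =====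
def Claim_equal_naiive : Prop := ∀ (m : Int) (k : Int), Dom_naiive m k → Pre_naiive m k → Spec_naiive m k (naiive m k)

-- ===== LEMMAS AND PROOFS =====

-- The step keeps the empty level empty.
theorem step_nil (level k : Int) : naiiveAltStep [] level k = [] := by
  unfold naiiveAltStep
  simp

-- B's loop with its early break computes the same foldl over the level range.
theorem loop_eq_foldl (k : Int) : ∀ (n : Nat) (level stop : Int) (results : List (List Int)),
    (stop - level).toNat = n →
    naiiveAltLoop k level stop results
      = (PySem.List.pyRange level stop 1).foldl (fun r l => naiiveAltStep r l k) results := by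
  intro n
  induction n with
  | zero =>
      intro level stop results h
      rw [naiiveAltLoop, if_neg (by omega), PySem.List.pyRange_one_eq_nil (by omega)]
      rfl
  | succ n ih =>
      intro level stop results h
      have hlt : level < stop := by omega
      rw [naiiveAltLoop, if_pos hlt, PySem.List.pyRange_one_cons hlt]
      by_cases he : results.isEmpty
      · rw [if_pos he]
        have hres : results = [] := List.isEmpty_iff.mp he
        subst hres
        -- foldl of the step over any range starting from [] stays []
        have hfix : ∀ (rng : List Int), List.foldl (fun r l => naiiveAltStep r l k) [] rng = [] := by
          intro rng
          induction rng with
          | nil => rfl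
          | cons x xs ihr => simpa [step_nil] using ihr
        simp [List.foldl, step_nil, hfix]
      · rw [if_neg he]
        exact ih (level + 1) stop (naiiveAltStep results level k) (by omega)

-- One level of B: the nested append-foldl is the same flatMap/map A's nested yields produce.
theorem b_step_eq (results : List (List Int)) (level k : Int) :
    naiiveAltStep results level k
    = (PySem.List.pyRange 0 (level * k) 1).flatMap (fun i =>
        results.map (fun s =>
          if i > level * k - k then
            List.replicate (k - level * k + i).toNat level ++ s ++ List.replicate (level * k - i).toNat level
          else
            PySem.List.slice s none (some i) ++ List.replicate k.toNat level ++ PySem.List.slice s (some i) none)) := by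
  unfold naiiveAltStep
  have hinner : ∀ (i : Int) (nxt : List (List Int)),
      results.foldl
        (fun nxt s =>
          nxt ++ [if i > level * k - k then
                    List.replicate (k - level * k + i).toNat level ++ s ++ List.replicate (level * k - i).toNat level
                  else
                    PySem.List.slice s none (some i) ++ List.replicate k.toNat level ++ PySem.List.slice s (some i) none])
        nxt
      = nxt ++ results.map (fun s =>
          if i > level * k - k then
            List.replicate (k - level * k + i).toNat level ++ s ++ List.replicate (level * k - i).toNat level
          else
            PySem.List.slice s none (some i) ++ List.replicate k.toNat level ++ PySem.List.slice s (some i) none) := by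
    intro i nxt
    exact PySem.List.foldl_append_singleton_eq_map _ _ _
  calc (PySem.List.pyRange 0 (level * k) 1).foldl _ []
      = (PySem.List.pyRange 0 (level * k) 1).foldl (fun nxt i => nxt ++
          results.map (fun s =>
            if i > level * k - k then
              List.replicate (k - level * k + i).toNat level ++ s ++ List.replicate (level * k - i).toNat level
            else
              PySem.List.slice s none (some i) ++ List.replicate k.toNat level ++ PySem.List.slice s (some i) none)) [] := by
        apply PySem.List.foldl_congr_mem
        intro nxt i _
        exact hinner i nxt
    _ = _ := by
        rw [PySem.List.foldl_append_eq_flatMap]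
        simp

-- The bottom-up loop run up to natural level n equals the recursion at m = n.
theorem naiive_alt_nat (n : Nat) (k : Int) :
    naiive_alt (n : Int) k = naiive (n : Int) k := by
  induction n with
  | zero =>
      show (if (0:Int) < 0 then _ else naiiveAltLoop k 1 (0 + 1) [[]]) = _
      rw [if_neg (by omega), loop_eq_foldl k _ 1 (0 + 1) [[]] rfl,
        PySem.List.pyRange_one_eq_nil (by omega)]
      simp [naiive]
  | succ n ih =>
      have hBfold : ∀ (b : Int), 0 ≤ b → naiive_alt b k
          = (PySem.List.pyRange 1 (b + 1) 1).foldl (fun r l => naiiveAltStep r l k) [[]] := by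
        intro b hb
        show (if b < 0 then _ else _) = _
        rw [if_neg (by omega)]
        exact loop_eq_foldl k _ 1 (b + 1) [[]] rfl
      have hsplit : PySem.List.pyRange 1 ((n : Int) + 1 + 1) 1
          = PySem.List.pyRange 1 ((n : Int) + 1) 1 ++ PySem.List.pyRange ((n : Int) + 1) ((n : Int) + 1 + 1) 1 :=
        PySem.List.pyRange_one_append 1 ((n : Int) + 1) ((n : Int) + 1 + 1) (by omega) (by omega)
      have hlast : PySem.List.pyRange ((n : Int) + 1) ((n : Int) + 1 + 1) 1 = [(n : Int) + 1] := by
        rw [PySem.List.pyRange_one_cons (by omega), PySem.List.pyRange_one_eq_nil (by omega)]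
      have hBn : naiive_alt ((n : Int) + 1) k = naiiveAltStep (naiive_alt (n : Int) k) ((n : Int) + 1) k := by
        rw [hBfold ((n : Int) + 1) (by omega), hsplit, hlast, List.foldl_append,
          ← hBfold (n : Int) (by omega)]
        rfl
      rw [Nat.cast_succ, hBn, ih, b_step_eq]
      have hA : naiive ((n : Int) + 1) k
          = (PySem.List.pyRange 0 (((n : Int) + 1) * k) 1).flatMap (fun i =>
              (naiive (n : Int) k).map (fun s =>
                if i > ((n : Int) + 1) * k - k then
                  List.replicate (k - ((n : Int) + 1) * k + i).toNat ((n : Int) + 1) ++ s ++ List.replicate (((n : Int) + 1) * k - i).toNat ((n : Int) + 1)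
                else
                  PySem.List.slice s none (some i) ++ List.replicate k.toNat ((n : Int) + 1) ++ PySem.List.slice s (some i) none)) := by
        rw [naiive]
        rw [if_neg (by omega), if_neg (by omega)]
        norm_num
      rw [hA]

-- ===== VERDICT (by name: the statement is the Claim_ definition above) =====
theorem naiive_spec : Claim_equal_naiive := by
  intro m k _ _
  unfold Spec_naiive
  by_cases hm : 0 ≤ m
  · obtain ⟨n, rfl⟩ := Int.eq_ofNat_of_zero_le hm
    exact (naiive_alt_nat n k).symm
  · have hm' : m < 0 := by omega
    have hA : naiive m k = [] := by
      rw [naiive, if_neg (by omega), if_pos hm']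
    have hB : naiive_alt m k = [] := by
      show (if m < 0 then _ else _) = _
      rw [if_pos hm']
    rw [hA, hB]
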